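-- pv_equiv track=rewrite | github.com/richardgzy/MyPythonCode | test/week3.py | compute_number_of_ways_with_memoization
-- ===== SOURCE A (Python) =====
-- def compute_number_of_ways_with_memoization(n, memory = {}):
--     if n==0: #base case
--         return 1
--     elif n in memory: #"memoization" case: if this value has already been computed
--         return memory[n]
--     else: # we need to compute this value because it has not been computed
--         sum = 0
--         for i in range(0, n):
--             sum += compute_number_of_ways_with_memoization(i, memory)
--         memory[n] = sum
--         return sum
-- ===== SOURCE B (Python) =====
-- def compute_number_of_ways_with_memoization(n, memory={}):
--     # Single bottom-up pass with a running prefix sum (no recursion); unlike A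
--     # it does not mutate `memory` -- equivalence is about the return value.
--     if n == 0:
--         return 1
--     if n in memory:
--         return memory[n]
--     if n < 0:
--         return 0
--     total = 1  # running sum of the values for 0..i
--     for i in range(1, n):
--         total += memory[i] if i in memory else total
--     return total
-- ===== Notes on version B (the rewrite author's own statement) =====
-- stated objective: alternative
-- what changed: Replaced the memoized recursion (quadratic in additions, mutating the dict) by a single iterative pass keeping a running prefix sum that reads memoized overrides directly from the given dict; B does not mutate memory.
import Mathlib
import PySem

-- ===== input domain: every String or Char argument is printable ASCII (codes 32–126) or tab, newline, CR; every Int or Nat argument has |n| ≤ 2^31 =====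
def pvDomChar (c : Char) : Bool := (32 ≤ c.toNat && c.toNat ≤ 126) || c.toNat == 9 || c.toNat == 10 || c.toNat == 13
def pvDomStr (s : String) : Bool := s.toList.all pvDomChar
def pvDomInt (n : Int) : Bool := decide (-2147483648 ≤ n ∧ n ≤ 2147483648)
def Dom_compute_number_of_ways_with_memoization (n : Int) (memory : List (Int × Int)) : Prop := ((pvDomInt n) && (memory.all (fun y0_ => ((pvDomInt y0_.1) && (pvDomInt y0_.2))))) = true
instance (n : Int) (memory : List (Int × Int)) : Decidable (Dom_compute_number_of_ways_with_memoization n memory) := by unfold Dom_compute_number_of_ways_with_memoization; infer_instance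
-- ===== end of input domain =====

-- B replaces A's memoized recursion by a single iterative prefix-sum pass;
-- A mutates `memory` in place, B does not — the equivalence proved here is
-- about the RETURN value only.


-- ===== PORT A =====
-- fuel = n.toNat suffices: every recursive call is on some i with 0 ≤ i < n.
-- The fuel-0 fallthrough is only reached for n < 0, where the Python loop is empty anyway.
def pyA_fuel : Nat → Int → PySem.Dict Int Int → Int × PySem.Dict Int Int
  | fuel, n, mem =>
    if n = 0 then (1, mem)
    else
      match PySem.Dict.get? mem n with
      | some v => (v, mem)
      | none =>
        match fuel with
        | 0 => (0, PySem.Dict.insert mem n 0)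
        | Nat.succ f =>
          let p := (PySem.List.pyRange 0 n 1).foldl
            (fun (acc : Int × PySem.Dict Int Int) i =>
              let r := pyA_fuel f i acc.2
              (acc.1 + r.1, r.2)) (0, mem)
          (p.1, PySem.Dict.insert p.2 n p.1)

def compute_number_of_ways_with_memoization (n : Int) (memory : List (Int × Int)) : Int :=
  (pyA_fuel n.toNat n (PySem.Dict.mk memory)).1

-- ===== PORT B =====
def compute_number_of_ways_with_memoization_alt (n : Int) (memory : List (Int × Int)) : Int :=
  if n = 0 then 1
  else
    match PySem.Dict.get? (PySem.Dict.mk memory) n with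
    | some v => v
    | none =>
      if n < 0 then 0
      else
        (PySem.List.pyRange 1 n 1).foldl
          (fun total i => total + ((PySem.Dict.get? (PySem.Dict.mk memory) i).getD total)) 1

-- ===== PRECONDITION & SPEC =====
def Spec_compute_number_of_ways_with_memoization (n : Int) (memory : List (Int × Int)) (out : Int) : Prop := out = compute_number_of_ways_with_memoization_alt n memory
instance (n : Int) (memory : List (Int × Int)) (out : Int) : Decidable (Spec_compute_number_of_ways_with_memoization n memory out) := by unfold Spec_compute_number_of_ways_with_memoization; infer_instance

-- ===== CLAIM (what is proved, stated in full; the proofs are below) =====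
def Claim_equal_compute_number_of_ways_with_memoization : Prop := ∀ (n : Int) (memory : List (Int × Int)), Dom_compute_number_of_ways_with_memoization n memory → Spec_compute_number_of_ways_with_memoization n memory (compute_number_of_ways_with_memoization n memory)

-- ===== LEMMAS AND PROOFS =====

-- During A's run, the memory is the original one plus entries whose value is exactly
-- what B computes for that key (A never overwrites, and only inserts correct values).
def MemExt (memory : List (Int × Int)) (mem : PySem.Dict Int Int) : Prop :=
  ∀ k : Int,
    PySem.Dict.get? mem k = PySem.Dict.get? (PySem.Dict.mk memory) k ∨
    (PySem.Dict.get? (PySem.Dict.mk memory) k = none ∧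
     PySem.Dict.get? mem k = some (compute_number_of_ways_with_memoization_alt k memory))

theorem memExt_refl (memory : List (Int × Int)) : MemExt memory (PySem.Dict.mk memory) :=
  fun _ => Or.inl rfl

theorem memExt_insert (memory : List (Int × Int)) (mem : PySem.Dict Int Int) (n : Int)
    (h0 : PySem.Dict.get? (PySem.Dict.mk memory) n = none)
    (hmem : MemExt memory mem) :
    MemExt memory (PySem.Dict.insert mem n (compute_number_of_ways_with_memoization_alt n memory)) := by
  intro k
  by_cases hk : k = n
  · subst hk
    exact Or.inr ⟨h0, PySem.Dict.get?_insert_self mem k _⟩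
  · rw [PySem.Dict.get?_insert_of_ne mem _ hk]
    exact hmem k

theorem memExt_none (memory : List (Int × Int)) (mem : PySem.Dict Int Int)
    (hmem : MemExt memory mem) (n : Int)
    (h : PySem.Dict.get? mem n = none) :
    PySem.Dict.get? (PySem.Dict.mk memory) n = none := by
  rcases hmem n with h' | ⟨h1, h2⟩
  · rw [← h', h]
  · rw [h] at h2; exact absurd h2 (by simp)

-- B's loop computes, for every m ≥ 1, the sum of B's values over 0..m-1.
theorem alt_prefix (memory : List (Int × Int)) :
    ∀ m : Nat, 1 ≤ m →
      (PySem.List.pyRange 1 (m : Int) 1).foldl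
        (fun total i => total + ((PySem.Dict.get? (PySem.Dict.mk memory) i).getD total)) 1
      = ((PySem.List.pyRange 0 (m : Int) 1).map
          (fun i => compute_number_of_ways_with_memoization_alt i memory)).sum := by
  intro m
  induction m with
  | zero => omega
  | succ m ih =>
    intro _
    by_cases hm : 1 ≤ m
    · have hcast : ((m + 1 : Nat) : Int) = (m : Int) + 1 := by push_cast; ring
      rw [hcast,
        PySem.List.pyRange_one_succ_right (a := 1) (by exact_mod_cast hm),
        PySem.List.pyRange_one_succ_right (a := 0) (by positivity),
        List.foldl_append, List.map_append, List.sum_append,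
        ih hm]
      simp only [List.foldl_cons, List.foldl_nil, List.map_cons, List.map_nil, List.sum_cons,
        List.sum_nil, add_zero]
      congr 1
      conv_rhs => unfold compute_number_of_ways_with_memoization_alt
      have hm0 : ¬ (m = 0) := by omega
      have hmneg : ¬ ((m : Int) < 0) := by omega
      cases hget : PySem.Dict.get? (PySem.Dict.mk memory) (m : Int) with
      | some v => simp [hm0]
      | none =>
        simp only [Option.getD_none]
        simp [hm0, hmneg]
        exact (ih hm).symm
    · have hm0 : m = 0 := by omega
      subst hm0
      norm_num [PySem.List.pyRange_one, compute_number_of_ways_with_memoization_alt]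

-- B satisfies A's recurrence at every key not present in the original memory.
theorem alt_rec (memory : List (Int × Int)) (n : Int) (hn : n ≠ 0)
    (h0 : PySem.Dict.get? (PySem.Dict.mk memory) n = none) :
    compute_number_of_ways_with_memoization_alt n memory
      = ((PySem.List.pyRange 0 n 1).map
          (fun i => compute_number_of_ways_with_memoization_alt i memory)).sum := by
  rcases lt_trichotomy n 0 with hneg | hz | hpos
  · rw [PySem.List.pyRange_one_eq_nil (le_of_lt hneg)]
    unfold compute_number_of_ways_with_memoization_alt
    simp [hn, h0, hneg]
  · exact absurd hz hn
  · have hcast : n = ((n.toNat : Nat) : Int) := by omega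
    have h1 : 1 ≤ n.toNat := by omega
    conv_lhs => unfold compute_number_of_ways_with_memoization_alt
    simp only [hn, if_false, h0, not_lt.mpr (le_of_lt hpos)]
    rw [hcast]
    exact alt_prefix memory n.toNat h1

-- Main invariant: with enough fuel and a memory that only extends the original one
-- correctly, A returns B's value and leaves a correctly-extended memory.
theorem pyA_main (memory : List (Int × Int)) :
    ∀ (fuel : Nat) (n : Int) (mem : PySem.Dict Int Int), n.toNat ≤ fuel → MemExt memory mem →
      (pyA_fuel fuel n mem).1 = compute_number_of_ways_with_memoization_alt n memory ∧
      MemExt memory (pyA_fuel fuel n mem).2 := by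
  intro fuel
  induction fuel with
  | zero =>
    intro n mem hle hmem
    by_cases hn : n = 0
    · subst hn
      simp [pyA_fuel, compute_number_of_ways_with_memoization_alt, hmem]
    · have hneg : n < 0 := by omega
      cases hget : PySem.Dict.get? mem n with
      | some v =>
        have hv : v = compute_number_of_ways_with_memoization_alt n memory := by
          rcases hmem n with h' | ⟨_, h2⟩
          · unfold compute_number_of_ways_with_memoization_alt
            simp [hn, ← h', hget]
          · rw [hget] at h2; exact (Option.some_inj.mp h2)
        constructor
        · simp [pyA_fuel, hn, hget, hv]
        · simpa [pyA_fuel, hn, hget] using hmem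
      | none =>
        have h0 := memExt_none memory mem hmem n hget
        have halt : compute_number_of_ways_with_memoization_alt n memory = 0 := by
          unfold compute_number_of_ways_with_memoization_alt
          simp [hn, h0, hneg]
        constructor
        · simp [pyA_fuel, hn, hget, halt]
        · have := memExt_insert memory mem n h0 hmem
          rw [halt] at this
          simpa [pyA_fuel, hn, hget] using this
  | succ f ih =>
    intro n mem hle hmem
    by_cases hn : n = 0
    · subst hn
      simp [pyA_fuel, compute_number_of_ways_with_memoization_alt, hmem]
    · cases hget : PySem.Dict.get? mem n with
      | some v =>
        have hv : v = compute_number_of_ways_with_memoization_alt n memory := by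
          rcases hmem n with h' | ⟨_, h2⟩
          · unfold compute_number_of_ways_with_memoization_alt
            simp [hn, ← h', hget]
          · rw [hget] at h2; exact (Option.some_inj.mp h2)
        constructor
        · simp [pyA_fuel, hn, hget, hv]
        · simpa [pyA_fuel, hn, hget] using hmem
      | none =>
        have h0 := memExt_none memory mem hmem n hget
        -- the loop
        have loop : ∀ (l : List Int), (∀ i ∈ l, i.toNat ≤ f) →
            ∀ (s : Int) (d : PySem.Dict Int Int), MemExt memory d →
            (l.foldl (fun (acc : Int × PySem.Dict Int Int) i =>
                let r := pyA_fuel f i acc.2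
                (acc.1 + r.1, r.2)) (s, d)).1
              = s + (l.map (fun i => compute_number_of_ways_with_memoization_alt i memory)).sum ∧
            MemExt memory
              ((l.foldl (fun (acc : Int × PySem.Dict Int Int) i =>
                let r := pyA_fuel f i acc.2
                (acc.1 + r.1, r.2)) (s, d)).2) := by
          intro l
          induction l with
          | nil => intro _ s d hd; simp [hd]
          | cons x xs ihl =>
            intro hbound s d hd
            have hx := ih x d (hbound x (by simp)) hd
            have := ihl (fun i hi => hbound i (by simp [hi])) (s + (pyA_fuel f x d).1)
              (pyA_fuel f x d).2 hx.2
            simp only [List.foldl_cons]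
            constructor
            · rw [this.1, hx.1]
              simp [add_assoc]
            · exact this.2
        have hb : ∀ i ∈ PySem.List.pyRange 0 n 1, i.toNat ≤ f := by
          intro i hi
          rw [PySem.List.mem_pyRange_one] at hi
          omega
        have hl := loop (PySem.List.pyRange 0 n 1) hb 0 mem hmem
        have hsum : (((PySem.List.pyRange 0 n 1).foldl (fun (acc : Int × PySem.Dict Int Int) i =>
              let r := pyA_fuel f i acc.2
              (acc.1 + r.1, r.2)) (0, mem)).1)
            = compute_number_of_ways_with_memoization_alt n memory := by
          rw [hl.1, zero_add, ← alt_rec memory n hn h0]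
        constructor
        · simp only [pyA_fuel, hn, if_false, hget]
          exact hsum
        · have hins := memExt_insert memory _ n h0 hl.2
          rw [← hsum] at hins
          simpa [pyA_fuel, hn, hget] using hins

-- ===== VERDICT (by name: the statement is the Claim_ definition above) =====
theorem compute_number_of_ways_with_memoization_spec : Claim_equal_compute_number_of_ways_with_memoization := by
  intro n memory _
  unfold Spec_compute_number_of_ways_with_memoization compute_number_of_ways_with_memoization
  exact (pyA_main memory n.toNat n (PySem.Dict.mk memory) (le_refl _) (memExt_refl memory)).1
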